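-- pv_equiv track=rewrite | github.com/Jeann1809/Python-practice-questions | sets_unit_2_2.py | count_endangered_species
-- ===== SOURCE A (Python) =====
-- def count_endangered_species(endangered_species, observed_species):
--     e_species = {}
--     for specie in endangered_species:
--         e_species[specie] = 0
--
--     for specie in observed_species:
--         if specie in e_species:
--             e_species[specie] += 1
--
--     return sum(e_species.values())
-- ===== SOURCE B (Python) =====
-- def count_endangered_species(endangered_species, observed_species):
--     return sum(observed_species.count(specie) for specie in set(endangered_species))
-- ===== Notes on version B (the rewrite author's own statement) =====
-- stated objective: simpler
-- what changed: B drops the dict entirely: it deduplicates the endangered list with a set and sums observed_species.count(specie) over it (sum is order-insensitive, so set order is irrelevant), instead of A's zero-initialised endangered dict incremented while scanning the observations.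
import Mathlib
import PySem

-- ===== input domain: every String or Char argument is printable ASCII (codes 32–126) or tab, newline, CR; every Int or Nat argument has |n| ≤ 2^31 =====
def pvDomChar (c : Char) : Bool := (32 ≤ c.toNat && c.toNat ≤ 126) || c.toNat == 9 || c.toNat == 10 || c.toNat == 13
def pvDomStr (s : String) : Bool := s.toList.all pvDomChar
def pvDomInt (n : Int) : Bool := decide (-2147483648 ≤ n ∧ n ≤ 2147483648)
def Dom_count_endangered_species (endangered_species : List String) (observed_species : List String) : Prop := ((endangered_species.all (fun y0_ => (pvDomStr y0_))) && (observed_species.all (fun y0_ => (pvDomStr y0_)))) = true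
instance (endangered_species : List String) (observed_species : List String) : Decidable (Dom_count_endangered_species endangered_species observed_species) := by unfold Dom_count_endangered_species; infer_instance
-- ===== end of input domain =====

-- B drops the dict entirely: it sums observed_species.count(specie) over the
-- distinct endangered species (set(endangered_species)); simpler one-liner,
-- not faster (O(n*m) vs A's O(n+m)).


-- ===== PORT A =====
-- e_species = {}; for specie in endangered: e_species[specie] = 0
-- for specie in observed: if specie in e_species: e_species[specie] += 1
-- return sum(e_species.values())
def count_endangered_species (endangered_species : List String) (observed_species : List String) : Int :=
  let e0 : PySem.Dict String Int :=
    endangered_species.foldl (fun d s => d.insert s 0) PySem.Dict.empty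
  let e1 : PySem.Dict String Int :=
    observed_species.foldl (fun d s => if d.contains s then d.insert s (d.getD s 0 + 1) else d) e0
  e1.values.sum

-- ===== PORT B =====
-- return sum(observed_species.count(specie) for specie in set(endangered_species))
-- (sum over a Python set is order-insensitive, so Set.ofList's order is exact)
def count_endangered_species_alt (endangered_species : List String) (observed_species : List String) : Int :=
  ((PySem.Set.ofList endangered_species).map
    (fun specie => (PySem.List.count observed_species specie : Int))).sum

-- ===== PRECONDITION & SPEC =====
def Spec_count_endangered_species (endangered_species : List String) (observed_species : List String) (out : Int) : Prop := out = count_endangered_species_alt endangered_species observed_species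
instance (endangered_species : List String) (observed_species : List String) (out : Int) : Decidable (Spec_count_endangered_species endangered_species observed_species out) := by unfold Spec_count_endangered_species; infer_instance

-- ===== CLAIM (what is proved, stated in full; the proofs are below) =====
def Claim_equal_count_endangered_species : Prop := ∀ (endangered_species : List String) (observed_species : List String), Dom_count_endangered_species endangered_species observed_species → Spec_count_endangered_species endangered_species observed_species (count_endangered_species endangered_species observed_species)

-- ===== LEMMAS AND PROOFS =====

-- A's init loop leaves every lookup at 0.
theorem getD_init_zero (l : List String) (d : PySem.Dict String Int)
    (h : ∀ k, d.getD k 0 = 0) (k : String) :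
    (l.foldl (fun d s => d.insert s (0 : Int)) d).getD k 0 = 0 := by
  induction l generalizing d with
  | nil => exact h k
  | cons x xs ih =>
      refine ih _ (fun k' => ?_)
      rw [PySem.Dict.getD_insert]
      split <;> simp [h]

-- A's counting loop: keys are unchanged.
theorem keys_count_loop (l : List String) (d : PySem.Dict String Int) :
    (l.foldl (fun d s => if d.contains s then d.insert s (d.getD s 0 + 1) else d) d).keys = d.keys := by
  induction l generalizing d with
  | nil => rfl
  | cons x xs ih =>
      simp only [List.foldl_cons]
      split
      · rename_i hc
        rw [ih, PySem.Dict.keys_insert_of_contains _ _ hc]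
      · exact ih d

-- A's counting loop: a key present in d ends at its old value plus its count in l.
theorem getD_count_loop (l : List String) (d : PySem.Dict String Int) (k : String)
    (hk : d.contains k = true) :
    (l.foldl (fun d s => if d.contains s then d.insert s (d.getD s 0 + 1) else d) d).getD k 0
      = d.getD k 0 + l.count k := by
  induction l generalizing d with
  | nil => simp
  | cons x xs ih =>
      simp only [List.foldl_cons]
      by_cases hx : d.contains x = true
      · rw [hx, if_pos rfl]
        have hk' : (d.insert x (d.getD x 0 + 1)).contains k = true := by
          rw [PySem.Dict.contains_insert]; simp [hk]
        rw [ih _ hk', PySem.Dict.getD_insert]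
        by_cases hkx : k = x
        · subst hkx; simp; ring
        · simp [hkx, Ne.symm hkx]
      · rw [Bool.of_not_eq_true hx, if_neg (by simp)]
        have hxk : ¬ k = x := by
          intro h; subst h; rw [hk] at hx; exact hx rfl
        rw [ih d hk, List.count_cons]
        simp [Ne.symm hxk]

-- A's counting loop preserves Nodup keys.
theorem nodup_count_loop (l : List String) (d : PySem.Dict String Int)
    (h : d.keys.Nodup) :
    (l.foldl (fun d s => if d.contains s then d.insert s (d.getD s 0 + 1) else d) d).keys.Nodup := by
  rw [keys_count_loop]; exact h

-- A equals the sum, over the distinct endangered species, of their counts in observed.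
theorem A_eq_sum (endangered observed : List String) :
    count_endangered_species endangered observed
      = ((PySem.Set.ofList endangered).map (fun k => (observed.count k : Int))).sum := by
  unfold count_endangered_species
  simp only []
  set e0 : PySem.Dict String Int :=
    endangered.foldl (fun d s => d.insert s 0) PySem.Dict.empty with he0
  have hkeys0 : e0.keys = PySem.Set.ofList endangered := by
    rw [he0, PySem.Dict.keys_foldl_insert]
    simp [PySem.Dict.keys_empty]
    rfl
  have hnd0 : e0.keys.Nodup := by
    rw [he0]; exact PySem.Dict.nodup_keys_foldl_insert _ _ _ (by simp)
  set f : PySem.Dict String Int → String → PySem.Dict String Int :=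
    (fun d s => if d.contains s then d.insert s (d.getD s 0 + 1) else d) with hf
  have hvals : (observed.foldl f e0).values
      = (observed.foldl f e0).keys.map (fun k => (observed.foldl f e0).getD k 0) :=
    PySem.Dict.values_eq_map_keys _ (nodup_count_loop _ _ hnd0) 0
  rw [hvals, keys_count_loop, hkeys0]
  congr 1
  apply List.map_congr_left
  intro k hk
  have hck : e0.contains k = true :=
    (PySem.Dict.contains_iff_mem_keys e0 k).2 (by rw [hkeys0]; exact hk)
  rw [getD_count_loop _ _ _ hck]
  have h0 : e0.getD k 0 = 0 := getD_init_zero _ _ (by simp) k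
  rw [h0]; ring

-- B is that sum definitionally (PySem.List.count is List.count).
theorem B_eq_sum (endangered observed : List String) :
    count_endangered_species_alt endangered observed
      = ((PySem.Set.ofList endangered).map (fun k => (observed.count k : Int))).sum := by
  unfold count_endangered_species_alt
  simp [PySem.List.count]

-- ===== VERDICT (by name: the statement is the Claim_ definition above) =====
theorem count_endangered_species_spec : Claim_equal_count_endangered_species := by
  intro e o _
  unfold Spec_count_endangered_species
  rw [A_eq_sum, B_eq_sum]
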